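-- pv_equiv track=rewrite | github.com/ayoubzulfiqar/Leetcode-Medium | MakeK-SubarraySumsEqual/make_k-subarray_sums_equal.py | makeKSumEqual
-- ===== SOURCE A (Python) =====
-- import math
--
-- def makeKSumEqual(arr: list[int], k: int) -> int:
--     n = len(arr)
--
--     g = math.gcd(n, k)
--
--     total_operations = 0
--
--     for start_idx in range(g):
--         current_group_elements = []
--
--         current_ptr = start_idx
--         for _ in range(n // g):
--             current_group_elements.append(arr[current_ptr])
--             current_ptr = (current_ptr + k) % n
--
--         current_group_elements.sort()
--
--         median = current_group_elements[len(current_group_elements) // 2]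
--
--         for val in current_group_elements:
--             total_operations += abs(val - median)
--
--     return total_operations
-- ===== SOURCE B (Python) =====
-- import math
--
-- def _quickselect(xs, j):
--     # j-th smallest element (0-based) of xs, by iterative three-way partitioning
--     while True:
--         p = xs[len(xs) // 2]
--         lt = [v for v in xs if v < p]
--         if j < len(lt):
--             xs = lt
--             continue
--         eq = xs.count(p)
--         if j < len(lt) + eq:
--             return p
--         j -= len(lt) + eq
--         xs = [v for v in xs if v > p]
--
-- def makeKSumEqual(arr: list[int], k: int) -> int:
--     n = len(arr)
--     g = math.gcd(n, k)
--     total = 0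
--     for r in range(g):
--         group = [arr[i] for i in range(r, n, g)]
--         med = _quickselect(group, len(group) // 2)
--         for v in group:
--             total += abs(v - med)
--     return total
-- ===== Notes on version B (the rewrite author's own statement) =====
-- stated objective: faster
-- what changed: B never sorts: each residue class arr[r::g] (g = gcd(n,k), replacing A's modular-pointer orbit walk) has its median found by an iterative three-way-partition quickselect (middle-element pivot), and the operation count is summed directly over the unsorted class.
-- outside the precondition, e.g. on makeKSumEqual([], 3): A raises IndexError, B raises IndexError
import Mathlib
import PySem

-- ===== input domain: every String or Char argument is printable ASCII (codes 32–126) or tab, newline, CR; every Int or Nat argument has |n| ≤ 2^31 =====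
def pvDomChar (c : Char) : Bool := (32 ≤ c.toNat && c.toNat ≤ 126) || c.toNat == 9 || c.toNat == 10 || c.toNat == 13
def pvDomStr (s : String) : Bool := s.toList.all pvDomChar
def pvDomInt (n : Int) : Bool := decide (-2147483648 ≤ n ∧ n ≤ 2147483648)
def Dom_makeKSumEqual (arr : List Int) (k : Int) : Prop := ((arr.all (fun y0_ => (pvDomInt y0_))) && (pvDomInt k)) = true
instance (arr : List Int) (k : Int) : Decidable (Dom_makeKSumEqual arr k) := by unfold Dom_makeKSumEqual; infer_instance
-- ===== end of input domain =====

-- B replaces A's sort-each-group median by a three-way-partition quickselect over each stride-g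
-- residue class and sums |v - median| over the unsorted class (objective: alternative, no sorting).

-- ===== PORT A =====
-- Literal port of A: for each start index below g = gcd(n, k), walk the orbit with pointer
-- (ptr + k) % n, sort the collected group, take the upper median, add absolute deviations.
-- arr[ptr] and group[len//2] are ported with pyGetD (default never read: Pre_ excludes the
-- only raising inputs, arr = [] with k ≠ 0, where Python's group[0] raises IndexError).
def makeKSumEqual (arr : List Int) (k : Int) : Int :=
  let n : Int := arr.length
  let g : Int := (Int.gcd n k : Nat)
  (PySem.List.pyRange 0 g 1).foldl (fun total_operations start_idx =>
    let st := (PySem.List.pyRange 0 (PySem.Int.floordiv n g) 1).foldl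
      (fun (st : List Int × Int) _ =>
        (st.1 ++ [PySem.List.pyGetD arr st.2 0], PySem.Int.mod (st.2 + k) n))
      ([], start_idx)
    let cge := PySem.List.sorted st.1 (fun x => x) false
    let median := PySem.List.pyGetD cge (PySem.Int.floordiv (cge.length : Int) 2) 0
    cge.foldl (fun t val => t + |val - median|) total_operations) 0

-- ===== PORT B =====
-- B-side helper: Source B's _quickselect — iterative three-way partition around the middle
-- element, here as the obvious structural recursion (the while-loop re-binds xs and j
-- exactly as the recursive calls do).  The [] branch is a totality guard only: Python's
-- xs[len(xs)//2] would raise there, and under Pre_ every call passes a nonempty list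
-- with 0 <= j < len(xs).  pvPivotMem below is cited by the termination proof.
theorem pvPivotMem (xs : List Int) (h : xs ≠ []) :
    PySem.List.pyGetD xs (PySem.Int.floordiv ((xs.length : Int)) 2) 0 ∈ xs := by
  have hl : 0 < xs.length := List.length_pos_iff.mpr h
  rw [show ((2:Int)) = ((2:Nat):Int) by norm_num, PySem.Int.floordiv_natCast,
    PySem.List.pyGetD_natCast, List.getD_eq_getElem _ _ (Nat.div_lt_self hl (by norm_num))]
  exact List.getElem_mem _

def pvQuickselect : List Int → Int → Int
  | [], _ => 0
  | p :: rest, j =>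
      let piv := PySem.List.pyGetD (p :: rest) (PySem.Int.floordiv (((p :: rest).length : Nat) : Int) 2) 0
      let lt := (p :: rest).filter (fun v => decide (v < piv))
      if j < (lt.length : Int) then pvQuickselect lt j
      else
        let eq := (p :: rest).count piv
        if j < (lt.length : Int) + (eq : Int) then piv
        else pvQuickselect ((p :: rest).filter (fun v => decide (piv < v))) (j - lt.length - eq)
termination_by xs _ => xs.length
decreasing_by
  · exact List.length_filter_lt_length_iff_exists.mpr
      ⟨piv, pvPivotMem (p :: rest) (by simp),
        by simp only [decide_eq_true_eq]; exact lt_irrefl piv⟩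
  · exact List.length_filter_lt_length_iff_exists.mpr
      ⟨piv, pvPivotMem (p :: rest) (by simp),
        by simp only [decide_eq_true_eq]; exact lt_irrefl piv⟩

-- Literal port of B: for each residue r < g = gcd(n, k), collect arr[r], arr[r+g], …
-- (range(r, n, g)), quickselect the upper median, sum |v - med| over the class.
def makeKSumEqual_alt (arr : List Int) (k : Int) : Int :=
  let n : Int := arr.length
  let g : Int := (Int.gcd n k : Nat)
  (PySem.List.pyRange 0 g 1).foldl (fun total r =>
    let group := (PySem.List.pyRange r n g).map (fun i => PySem.List.pyGetD arr i 0)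
    let med := pvQuickselect group (PySem.Int.floordiv (group.length : Int) 2)
    group.foldl (fun t v => t + |v - med|) total) 0

-- ===== PRECONDITION & SPEC =====
-- Pre_ excludes exactly arr = [] with k ≠ 0: there Python's A raises IndexError
-- (current_group_elements[0] on an empty group) and B's _quickselect raises the same.
def Pre_makeKSumEqual (arr : List Int) (k : Int) : Prop := arr ≠ [] ∨ k = 0
instance (arr : List Int) (k : Int) : Decidable (Pre_makeKSumEqual arr k) := by unfold Pre_makeKSumEqual; infer_instance
def pvWitness_makeKSumEqual : List Int × Int := ([1, 4, 1, 3], 2)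

def Spec_makeKSumEqual (arr : List Int) (k : Int) (out : Int) : Prop := out = makeKSumEqual_alt arr k
instance (arr : List Int) (k : Int) (out : Int) : Decidable (Spec_makeKSumEqual arr k out) := by unfold Spec_makeKSumEqual; infer_instance

-- ===== CLAIM (what is proved, stated in full; the proofs are below) =====
def Claim_equal_makeKSumEqual : Prop := ∀ (arr : List Int) (k : Int), Dom_makeKSumEqual arr k → Pre_makeKSumEqual arr k → Spec_makeKSumEqual arr k (makeKSumEqual arr k)

-- ===== LEMMAS AND PROOFS =====

-- A's inner walk, as a structural recursion on the remaining step count.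
def pvWalk (arr : List Int) (k n : Int) : Int → Nat → List Int
  | _, 0 => []
  | p, m+1 => PySem.List.pyGetD arr p 0 :: pvWalk arr k n (PySem.Int.mod (p + k) n) m

-- the walk's index sequence, in Nat
def pvWalkN (n kk : Nat) : Nat → Nat → List Nat
  | _, 0 => []
  | q, m+1 => q :: pvWalkN n kk ((q + kk) % n) m

-- A's inner fold produces the walk list
theorem pvFold_walk (arr : List Int) (k n : Int) (l : List Int) :
    ∀ (acc : List Int) (p : Int),
    (l.foldl (fun (st : List Int × Int) _ =>
        (st.1 ++ [PySem.List.pyGetD arr st.2 0], PySem.Int.mod (st.2 + k) n)) (acc, p)).1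
      = acc ++ pvWalk arr k n p l.length := by
  induction l with
  | nil => intro acc p; simp [pvWalk]
  | cons x xs ih =>
      intro acc p
      simp only [List.foldl_cons, List.length_cons]
      rw [ih]
      simp [pvWalk]

theorem pvWalk_eq_walkN (arr : List Int) (k : Int) (n : Nat) (hn : 0 < n)
    (hl : arr.length = n) :
    ∀ (m : Nat) (q : Nat), q < n →
      pvWalk arr k (n : Int) (q : Int) m
        = (pvWalkN n (PySem.Int.mod k (n : Int)).toNat q m).map (fun j => arr.getD j 0) := by
  have hnz : (0:Int) < (n:Int) := by exact_mod_cast hn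
  intro m
  induction m with
  | zero => intro q hq; simp [pvWalk, pvWalkN]
  | succ m ih =>
      intro q hq
      set kk : Nat := (PySem.Int.mod k (n : Int)).toNat with hkk
      have hkmod : ((kk : Int)) = k % (n : Int) := by
        rw [hkk, PySem.Int.mod_eq_emod_of_pos hnz]
        exact Int.toNat_of_nonneg (Int.emod_nonneg k (by omega))
      have hstep : PySem.Int.mod ((q : Int) + k) (n : Int) = (((q + kk) % n : Nat) : Int) := by
        rw [PySem.Int.mod_eq_emod_of_pos hnz]
        push_cast
        rw [hkmod, Int.add_emod ((q : Int)) (k % (n : Int)),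
          Int.emod_emod_of_dvd k (dvd_refl ((n : Int))), ← Int.add_emod]
      rw [pvWalk, pvWalkN, hstep, ih ((q + kk) % n) (Nat.mod_lt _ hn)]
      simp [PySem.List.pyGetD_natCast]

theorem pvWalkN_closed (n kk : Nat) (hn : 0 < n) :
    ∀ (m q : Nat), q < n →
      pvWalkN n kk q m = (List.range m).map (fun t => (q + t * kk) % n) := by
  intro m
  induction m with
  | zero => intro q hq; simp [pvWalkN]
  | succ m ih =>
      intro q hq
      rw [pvWalkN, ih ((q + kk) % n) (Nat.mod_lt _ hn), List.range_succ_eq_map]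
      simp only [List.map_cons, List.map_map]
      refine congrArg₂ _ ?_ (List.map_congr_left ?_)
      · simp [Nat.mod_eq_of_lt hq]
      · intro t _
        show ((q + kk) % n + t * kk) % n = (q + (t + 1) * kk) % n
        rw [Nat.mod_add_mod]
        ring_nf

-- the heart: the orbit index list is a permutation of the stride-g slice index list
theorem pvIdx_perm (n kk gN r' : Nat) (hn : 0 < n) (hg : Nat.gcd n kk = gN) (hr : r' < gN) :
    ((List.range (n / gN)).map (fun t => (r' + t * kk) % n)).Perm
      ((List.range (n / gN)).map (fun t => r' + t * gN)) := by
  have hgpos : 0 < gN := by omega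
  have hgn : gN ∣ n := hg ▸ Nat.gcd_dvd_left n kk
  have hgk : gN ∣ kk := hg ▸ Nat.gcd_dvd_right n kk
  set m := n / gN with hm
  have hnm : n = m * gN := (Nat.div_mul_cancel hgn).symm
  have hkk' : kk = (kk / gN) * gN := (Nat.div_mul_cancel hgk).symm
  have hco : Nat.Coprime m (kk / gN) := by
    have h := Nat.coprime_div_gcd_div_gcd (m := n) (n := kk) (by rw [hg]; exact hgpos)
    rwa [hg] at h
  have haux : ∀ t1 t2 : Nat, t2 ≤ t1 → t1 < m →
      (r' + t1 * kk) % n = (r' + t2 * kk) % n → t1 = t2 := by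
    intro t1 t2 hle hlt heq
    have hmod : Nat.ModEq n (r' + t2 * kk) (r' + t1 * kk) := heq.symm
    have h2 : Nat.ModEq n (t2 * kk) (t1 * kk) := Nat.ModEq.add_left_cancel' r' hmod
    have hdvd : n ∣ t1 * kk - t2 * kk :=
      (Nat.modEq_iff_dvd' (Nat.mul_le_mul_right kk hle)).mp h2
    rw [← Nat.sub_mul] at hdvd
    have hdvd2 : m * gN ∣ ((t1 - t2) * (kk / gN)) * gN := by
      rw [mul_assoc, ← hkk', ← hnm]; exact hdvd
    have hmd : m ∣ (t1 - t2) * (kk / gN) := (Nat.mul_dvd_mul_iff_right hgpos).mp hdvd2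
    have hmt : m ∣ t1 - t2 := hco.dvd_of_dvd_mul_right hmd
    have : t1 - t2 = 0 := Nat.eq_zero_of_dvd_of_lt hmt (by omega)
    omega
  have hnd1 : ((List.range m).map (fun t => (r' + t * kk) % n)).Nodup := by
    refine List.Nodup.map_on ?_ (List.nodup_range)
    intro t1 ht1 t2 ht2 heq
    rw [List.mem_range] at ht1 ht2
    rcases le_total t2 t1 with h | h
    · exact haux t1 t2 h ht1 heq
    · exact (haux t2 t1 h ht2 heq.symm).symm
  have hsub : ((List.range m).map (fun t => (r' + t * kk) % n)) ⊆
      ((List.range m).map (fun t => r' + t * gN)) := by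
    intro x hx
    rw [List.mem_map] at hx
    obtain ⟨t, _, rfl⟩ := hx
    set x := (r' + t * kk) % n with hx
    have hxn : x < n := Nat.mod_lt _ hn
    have hxg : x % gN = r' := by
      rw [hx, Nat.mod_mod_of_dvd _ hgn]
      conv_lhs => rw [hkk', ← mul_assoc]
      rw [Nat.add_mul_mod_self_right, Nat.mod_eq_of_lt hr]
    have hdm := Nat.div_add_mod x gN
    rw [hxg, mul_comm] at hdm
    rw [List.mem_map]
    refine ⟨x / gN, List.mem_range.mpr ?_, by omega⟩
    rw [Nat.div_lt_iff_lt_mul hgpos, ← hnm]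
    exact hxn
  have hnd2 : ((List.range m).map (fun t => r' + t * gN)).Nodup := by
    refine List.Nodup.map_on ?_ (List.nodup_range)
    intro t1 _ t2 _ heq
    have : t1 * gN = t2 * gN := by omega
    exact Nat.eq_of_mul_eq_mul_right hgpos this
  exact (hnd1.subperm hsub).perm_of_length_le (by simp)

-- gcd is unchanged by reducing k modulo n
theorem pvGcd_mod (n : Nat) (k : Int) (hn : 0 < n) :
    Nat.gcd n (PySem.Int.mod k (n : Int)).toNat = Int.gcd (n : Int) k := by
  have hnz : (0:Int) < (n:Int) := by exact_mod_cast hn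
  rw [PySem.Int.mod_eq_emod_of_pos hnz]
  have h0 : (0:Int) ≤ k % (n:Int) := Int.emod_nonneg k (by omega)
  have h2 : ((k % (n:Int)).toNat : Int) = k % (n:Int) := Int.toNat_of_nonneg h0
  have h1 : ∀ x : Nat, Nat.gcd n x = Int.gcd (n:Int) (x : Int) := by
    intro x; simp [Int.gcd]
  rw [h1, h2, Int.emod_def, Int.gcd_sub_mul_left_right]

-- quickselect correctness: pvQuickselect xs j is the j-th element of sorted(xs)
theorem pvQselect_sorted : ∀ (N : Nat) (xs : List Int), xs.length ≤ N → ∀ j : Nat, j < xs.length →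
    pvQuickselect xs (j : Int) = (PySem.List.sorted xs (fun x => x) false).getD j 0 := by
  intro N
  induction N with
  | zero => intro xs hN j hj; omega
  | succ N ih =>
      intro xs hN j hj
      match xs, hj with
      | p :: rest, hj =>
        set xl := p :: rest with hxl
        set piv := PySem.List.pyGetD xl (PySem.Int.floordiv ((xl.length : Nat) : Int) 2) 0 with hpiv
        have hpmem : piv ∈ xl := pvPivotMem xl (by rw [hxl]; simp)
        set lt := xl.filter (fun v => decide (v < piv)) with hlt
        set eqs := xl.filter (fun v => v == piv) with heqs
        set gt := xl.filter (fun v => decide (piv < v)) with hgt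
        -- the three filters partition xl up to permutation
        have hperm3 : (lt ++ (eqs ++ gt)).Perm xl := by
          have h1 : (xl.filter (fun v => decide (v < piv)) ++
              xl.filter (fun v => !decide (v < piv))).Perm xl :=
            List.filter_append_perm _ xl
          have h2 : ((xl.filter (fun v => !decide (v < piv))).filter (fun v => v == piv) ++
              (xl.filter (fun v => !decide (v < piv))).filter (fun v => !(v == piv))).Perm
              (xl.filter (fun v => !decide (v < piv))) :=
            List.filter_append_perm _ _
          have he : (xl.filter (fun v => !decide (v < piv))).filter (fun v => v == piv) = eqs := by
            rw [List.filter_filter, heqs]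
            apply List.filter_congr
            intro v _
            by_cases hv : v = piv
            · subst hv; simp
            · simp [hv]
          have hg2 : (xl.filter (fun v => !decide (v < piv))).filter (fun v => !(v == piv)) = gt := by
            rw [List.filter_filter, hgt]
            apply List.filter_congr
            intro v _
            rcases lt_trichotomy v piv with h | h | h
            · simp [h, not_lt_of_gt h]
            · subst h; simp
            · simp [h, (ne_of_gt h), not_lt_of_gt h]
          rw [he, hg2] at h2
          exact (List.Perm.append_left lt h2.symm).symm.trans h1
        have hpermS : ((PySem.List.sorted lt (fun x => x) false) ++
            (eqs ++ (PySem.List.sorted gt (fun x => x) false))).Perm xl := by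
          refine List.Perm.trans ?_ hperm3
          refine List.Perm.append (PySem.List.sorted_perm _ _ _) ?_
          exact List.Perm.append_left eqs (PySem.List.sorted_perm _ _ _)
        -- membership facts
        have hmlt : ∀ v ∈ PySem.List.sorted lt (fun x => x) false, v < piv := by
          intro v hv
          have := (PySem.List.mem_sorted _ _ _ _).mp hv
          rw [hlt, List.mem_filter] at this
          simpa using this.2
        have hmeq : ∀ v ∈ eqs, v = piv := by
          intro v hv
          rw [heqs, List.mem_filter] at hv
          simpa using hv.2
        have hmgt : ∀ v ∈ PySem.List.sorted gt (fun x => x) false, piv < v := by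
          intro v hv
          have := (PySem.List.mem_sorted _ _ _ _).mp hv
          rw [hgt, List.mem_filter] at this
          simpa using this.2
        -- sortedness of the concatenation
        have hpw : ((PySem.List.sorted lt (fun x => x) false) ++
            (eqs ++ (PySem.List.sorted gt (fun x => x) false))).Pairwise (· ≤ ·) := by
          rw [List.pairwise_append]
          refine ⟨by simpa using PySem.List.sorted_pairwise lt (fun x : Int => x), ?_, ?_⟩
          · rw [List.pairwise_append]
            refine ⟨?_, by simpa using PySem.List.sorted_pairwise gt (fun x : Int => x), ?_⟩
            · exact List.pairwise_of_forall_mem_list (fun a ha b hb => by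
                rw [hmeq a ha, hmeq b hb])
            · intro a ha b hb
              rw [hmeq a ha]
              exact le_of_lt (hmgt b hb)
          · intro a ha b hb
            rcases List.mem_append.mp hb with hb | hb
            · rw [hmeq b hb]; exact le_of_lt (hmlt a ha)
            · exact le_of_lt (lt_trans (hmlt a ha) (hmgt b hb))
        have hdecomp : PySem.List.sorted xl (fun x => x) false =
            (PySem.List.sorted lt (fun x => x) false) ++
            (eqs ++ (PySem.List.sorted gt (fun x => x) false)) :=
          PySem.List.sorted_id_eq_of_perm_of_pairwise _ _ hpermS hpw
        -- lengths
        have hlen3 : lt.length + eqs.length + gt.length = xl.length := by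
          have := hperm3.length_eq
          simp only [List.length_append] at this
          omega
        have hltlen : lt.length < xl.length :=
          List.length_filter_lt_length_iff_exists.mpr ⟨piv, hpmem, by simp⟩
        have hgtlen : gt.length < xl.length :=
          List.length_filter_lt_length_iff_exists.mpr ⟨piv, hpmem, by simp⟩
        have hcount : xl.count piv = eqs.length := by
          rw [heqs, List.count, List.countP_eq_length_filter]
        have hxlen : xl.length = rest.length + 1 := by rw [hxl]; rfl
        -- unfold one step of the port
        rw [pvQuickselect]
        simp only [← hxl, ← hpiv, ← hlt, ← hgt, hcount]
        by_cases h1 : j < lt.length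
        · rw [if_pos (by exact_mod_cast h1)]
          rw [ih lt (by omega) j h1, hdecomp,
            List.getD_append _ _ _ _ (by rw [PySem.List.length_sorted]; exact h1)]
        · rw [if_neg (by omega)]
          by_cases h2 : j < lt.length + eqs.length
          · rw [if_pos (by omega)]
            rw [hdecomp, List.getD_append_right _ _ _ _
                (by rw [PySem.List.length_sorted]; omega),
              PySem.List.length_sorted,
              List.getD_append _ _ _ _ (by omega),
              List.getD_eq_getElem _ _ (by omega)]
            exact (hmeq _ (List.getElem_mem _)).symm
          · rw [if_neg (by omega)]
            have hj3 : j - lt.length - eqs.length < gt.length := by omega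
            have hcast : (j : Int) - lt.length - eqs.length =
                ((j - lt.length - eqs.length : Nat) : Int) := by omega
            rw [hcast, ih gt (by omega) _ hj3, hdecomp,
              List.getD_append_right _ _ _ _
                (by rw [PySem.List.length_sorted]; omega),
              PySem.List.length_sorted,
              List.getD_append_right _ _ _ _ (by omega)]

-- ===== VERDICT (by name: the statement is the Claim_ definition above) =====
theorem makeKSumEqual_spec : Claim_equal_makeKSumEqual := by
  intro arr k _ hpre
  unfold Spec_makeKSumEqual
  by_cases harr : arr = []
  · have hk : k = 0 := by
      rcases hpre with h | h
      · exact absurd harr h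
      · exact h
    subst harr; subst hk; decide
  · set nN := arr.length with hnN
    have hn : 0 < nN := List.length_pos_iff.mpr harr
    have hnz : (0:Int) < (nN:Int) := by exact_mod_cast hn
    set kk := (PySem.Int.mod k (nN : Int)).toNat with hkkdef
    set gN := Nat.gcd nN kk with hgNdef
    have hgEq : Int.gcd (nN : Int) k = gN := (pvGcd_mod nN k hn).symm
    have hgpos : 0 < gN := Nat.gcd_pos_of_pos_left kk hn
    have hgn : gN ∣ nN := Nat.gcd_dvd_left nN kk
    have hgle : gN ≤ nN := Nat.le_of_dvd hn hgn
    set m := nN / gN with hmdef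
    have hm : 0 < m := Nat.div_pos hgle hgpos
    have hnm : nN = m * gN := (Nat.div_mul_cancel hgn).symm
    simp only [makeKSumEqual, makeKSumEqual_alt, ← hnN, hgEq]
    apply PySem.List.foldl_congr_mem
    intro total r hrmem
    rw [PySem.List.mem_pyRange_one] at hrmem
    obtain ⟨hr0, hrg⟩ := hrmem
    set r' := r.toNat with hr'def
    have hrr : r = (r' : Int) := (Int.toNat_of_nonneg hr0).symm
    have hr' : r' < gN := by omega
    have hr'n : r' < nN := by omega
    -- A's group list
    have hflen : (PySem.List.pyRange 0 (PySem.Int.floordiv (nN : Int) (gN : Int)) 1).length = m := by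
      rw [PySem.Int.floordiv_natCast, PySem.List.length_pyRange_one, ← hmdef]
      omega
    have hAwalk : ((PySem.List.pyRange 0 (PySem.Int.floordiv (nN : Int) (gN : Int)) 1).foldl
        (fun (st : List Int × Int) _ =>
          (st.1 ++ [PySem.List.pyGetD arr st.2 0], PySem.Int.mod (st.2 + k) (nN : Int)))
        ([], r)).1
        = ((List.range m).map (fun t => (r' + t * kk) % nN)).map (fun j => arr.getD j 0) := by
      rw [hrr, pvFold_walk arr k (nN : Int) _ [] (r' : Int), hflen, List.nil_append,
        pvWalk_eq_walkN arr k nN hn hnN.symm m r' hr'n,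
        pvWalkN_closed nN kk hn m r' hr'n]
    -- B's group list
    have hBrange : PySem.List.pyRange r (nN : Int) (gN : Int) =
        (List.range m).map (fun t => ((r' + t * gN : Nat) : Int)) := by
      rw [PySem.List.pyRange_of_pos r (nN : Int) (by exact_mod_cast hgpos)]
      have hcnt : (if r < (nN : Int) then (((nN : Int) - r + gN - 1) / gN).toNat else 0) = m := by
        rw [if_pos (by omega)]
        have hnm' : nN = gN * m := by rw [hnm, Nat.mul_comm]
        have he : (nN : Int) - r + gN - 1 = ((gN * m + (gN - 1 - r') : Nat) : Int) := by
          rw [hnm']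
          push_cast
          omega
        rw [he, ← Int.natCast_div, Int.toNat_natCast, Nat.mul_add_div hgpos,
          Nat.div_eq_of_lt (by omega), Nat.add_zero]
      rw [hcnt]
      refine List.map_congr_left ?_
      intro t _
      rw [hrr]
      push_cast
      ring
    have hBvals : (PySem.List.pyRange r (nN : Int) (gN : Int)).map (fun i => PySem.List.pyGetD arr i 0)
        = ((List.range m).map (fun t => r' + t * gN)).map (fun j => arr.getD j 0) := by
      rw [hBrange, List.map_map, List.map_map]
      refine List.map_congr_left ?_
      intro t _
      exact PySem.List.pyGetD_natCast arr (r' + t * gN) 0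
    rw [hAwalk, hBvals]
    set grp := ((List.range m).map (fun t => r' + t * gN)).map (fun j => arr.getD j 0) with hgrp
    have hgl : grp.length = m := by rw [hgrp]; simp
    have hperm : (((List.range m).map (fun t => (r' + t * kk) % nN)).map (fun j => arr.getD j 0)).Perm grp :=
      (pvIdx_perm nN kk gN r' hn rfl hr').map _
    rw [(PySem.List.sorted_id_eq_sorted_id_iff_perm _ _).mpr hperm]
    set s := PySem.List.sorted grp (fun x => x) false with hsdef
    have hsl : s.length = m := by rw [hsdef, PySem.List.length_sorted, hgl]
    have hspg : s.Perm grp := PySem.List.sorted_perm _ _ _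
    -- both medians are s[m/2]
    have hmedA : PySem.List.pyGetD s (PySem.Int.floordiv (s.length : Int) 2) 0 = s.getD (m / 2) 0 := by
      rw [show ((2:Int)) = ((2:Nat):Int) by norm_num, PySem.Int.floordiv_natCast,
        PySem.List.pyGetD_natCast, hsl]
    have hmedB : pvQuickselect grp (PySem.Int.floordiv (grp.length : Int) 2) = s.getD (m / 2) 0 := by
      rw [hgl, show ((2:Int)) = ((2:Nat):Int) by norm_num, PySem.Int.floordiv_natCast,
        pvQselect_sorted grp.length grp (le_refl _) (m / 2)
          (by rw [hgl]; exact Nat.div_lt_self hm (by norm_num)), ← hsdef]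
    rw [hmedA, hmedB]
    -- both inner loops sum |v - med| over permuted lists
    rw [PySem.List.foldl_add, PySem.List.foldl_add]
    congr 1
    exact List.Perm.sum_eq (hspg.map _)
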